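-- pv_equiv track=rewrite | github.com/opendr-io/dune | Cloudtrail/cloudtrail_ingest.py | date_from_s3_key
-- ===== SOURCE A (Python) =====
-- def date_from_s3_key(key):
--     parts = key.split("/")
--     for i in range(len(parts) - 2):
--         year, month, day = parts[i : i + 3]
--         if (
--             len(year) == 4
--             and year.isdigit()
--             and len(month) == 2
--             and month.isdigit()
--             and len(day) == 2
--             and day.isdigit()
--         ):
--             return f"{year}-{month}-{day}"
--     return "unknown"
-- ===== SOURCE B (Python) =====
-- def date_from_s3_key(key):
--     # single-state-machine pass: track (year, month) candidates; valid because
--     # 4-digit and 2-digit segment classes are disjoint, so no backtracking is needed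
--     y = m = None
--     for p in key.split("/"):
--         if len(p) == 4 and p.isdigit():
--             y, m = p, None
--         elif len(p) == 2 and p.isdigit() and y is not None:
--             if m is None:
--                 m = p
--             else:
--                 return f"{y}-{m}-{p}"
--         else:
--             y = m = None
--     return "unknown"
-- ===== Notes on version B (the rewrite author's own statement) =====
-- stated objective: alternative
-- what changed: Replaces A's sliding-window scan over parts[i:i+3] slices (re-testing each segment up to three times) with a single-pass state machine that carries the current (year, month) candidates and never slices; it is correct without backtracking because the 4-digit and 2-digit segment classes are disjoint.
import Mathlib
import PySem

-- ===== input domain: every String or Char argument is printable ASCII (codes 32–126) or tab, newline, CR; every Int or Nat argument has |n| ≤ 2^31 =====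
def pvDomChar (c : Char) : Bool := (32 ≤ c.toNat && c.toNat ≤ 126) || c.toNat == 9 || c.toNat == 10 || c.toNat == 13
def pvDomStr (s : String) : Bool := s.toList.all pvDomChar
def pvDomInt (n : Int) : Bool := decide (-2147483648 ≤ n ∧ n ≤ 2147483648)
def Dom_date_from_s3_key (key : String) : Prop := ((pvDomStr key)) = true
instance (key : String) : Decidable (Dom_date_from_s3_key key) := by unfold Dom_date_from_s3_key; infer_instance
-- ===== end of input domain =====

-- B replaces A's sliding-window scan over parts[i:i+3] slices by a one-pass state
-- machine carrying the current (year, month) candidates (alternative decomposition).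

-- ===== PORT A =====
-- the six validity checks, in A's short-circuit order
def dfkCheckA (y m d : String) : Bool :=
  PySem.Str.len y == 4 && PySem.Str.strIsdigit y &&
  PySem.Str.len m == 2 && PySem.Str.strIsdigit m &&
  PySem.Str.len d == 2 && PySem.Str.strIsdigit d

-- 'for i in range(len(parts) - 2): …' (range(n-2) is empty for len < 2, matching Nat '- 2')
def dfkLoopA (parts : List String) (i n : Nat) : String :=
  if i < n then
    match PySem.List.slice parts (some (i : Int)) (some ((i : Int) + 3)) with
    | [y, m, d] =>
        if dfkCheckA y m d then y ++ "-" ++ m ++ "-" ++ d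
        else dfkLoopA parts (i + 1) n
    | _ => dfkLoopA parts (i + 1) n   -- unreachable: for i < len-2 the slice has 3 elements
  else "unknown"
termination_by n - i

def date_from_s3_key (key : String) : String :=
  let parts := (PySem.Str.split? key "/").getD []
  dfkLoopA parts 0 (parts.length - 2)

-- ===== PORT B =====
-- 'len(p) == 4 and p.isdigit()' / 'len(p) == 2 and p.isdigit()'
def dfkIs4 (p : String) : Bool := PySem.Str.len p == 4 && PySem.Str.strIsdigit p
def dfkIs2 (p : String) : Bool := PySem.Str.len p == 2 && PySem.Str.strIsdigit p

-- Source B's for-loop over parts with mutable state y, m (None = none)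
def dfkLoopB (y? m? : Option String) : List String → String
  | [] => "unknown"
  | p :: r =>
    if dfkIs4 p then dfkLoopB (some p) none r
    else if dfkIs2 p && y?.isSome then
      match y?, m? with
      | some y, none => dfkLoopB (some y) (some p) r
      | some y, some m => y ++ "-" ++ m ++ "-" ++ p
      | none, _ => dfkLoopB none none r   -- unreachable: y?.isSome was tested
    else dfkLoopB none none r

def date_from_s3_key_alt (key : String) : String :=
  let parts := (PySem.Str.split? key "/").getD []
  dfkLoopB none none parts

-- ===== PRECONDITION & SPEC =====
def Spec_date_from_s3_key (key : String) (out : String) : Prop := out = date_from_s3_key_alt key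
instance (key : String) (out : String) : Decidable (Spec_date_from_s3_key key out) := by unfold Spec_date_from_s3_key; infer_instance

-- ===== CLAIM (what is proved, stated in full; the proofs are below) =====
def Claim_equal_date_from_s3_key : Prop := ∀ (key : String), Dom_date_from_s3_key key → Spec_date_from_s3_key key (date_from_s3_key key)

-- ===== LEMMAS AND PROOFS =====

-- common sliding-window reference function
def dfkGo : List String → String
  | y :: m :: d :: r =>
      if dfkCheckA y m d then y ++ "-" ++ m ++ "-" ++ d else dfkGo (m :: d :: r)
  | _ => "unknown"

lemma dfkGo_short (ps : List String) (h : ps.length ≤ 2) : dfkGo ps = "unknown" := by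
  match ps with
  | [] => rfl
  | [_] => rfl
  | [_, _] => rfl
  | _ :: _ :: _ :: _ => simp at h

lemma dfkLoopA_eq_go (parts : List String) (i : Nat) :
    dfkLoopA parts i (parts.length - 2) = dfkGo (parts.drop i) := by
  by_cases h : i < parts.length - 2
  · have hlen : 2 < (parts.drop i).length := by simp [List.length_drop]; omega
    match e : parts.drop i with
    | [] => simp [e] at hlen
    | [_] => simp [e] at hlen
    | [_, _] => simp [e] at hlen
    | y :: m :: d :: r =>
      have hs : PySem.List.slice parts (some (i : Int)) (some ((i : Int) + 3))
          = [y, m, d] := by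
        have := PySem.List.slice_natCast_add (xs := parts) (j := i) (n := 3)
        simpa [e] using this
      have htail : parts.drop (i + 1) = m :: d :: r := by
        have : (parts.drop i).tail = parts.drop (i + 1) := List.tail_drop
        simpa [e] using this.symm
      rw [dfkLoopA]
      simp only [if_pos h, hs]
      by_cases hc : dfkCheckA y m d
      · simp [hc, dfkGo]
      · have ih := dfkLoopA_eq_go parts (i + 1)
        simp [hc, dfkGo, ih, htail]
  · rw [dfkLoopA, if_neg h]
    have : (parts.drop i).length ≤ 2 := by simp [List.length_drop]; omega
    exact (dfkGo_short _ this).symm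
termination_by parts.length - i
decreasing_by omega

-- 4-digit and 2-digit segments are disjoint classes
lemma dfkIs4_not_is2 {p : String} (h : dfkIs4 p = true) : dfkIs2 p = false := by
  simp only [dfkIs4, Bool.and_eq_true, beq_iff_eq, PySem.Str.len_eq] at h
  obtain ⟨h4, _⟩ := h
  simp only [dfkIs2, PySem.Str.len_eq]
  simp
  intro hlen
  rw [← String.length_toList] at hlen
  omega

lemma dfkIs2_not_is4 {p : String} (h : dfkIs2 p = true) : dfkIs4 p = false := by
  simp only [dfkIs2, Bool.and_eq_true, beq_iff_eq, PySem.Str.len_eq] at h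
  obtain ⟨h2, _⟩ := h
  simp only [dfkIs4, PySem.Str.len_eq]
  simp
  intro hlen
  rw [← String.length_toList] at hlen
  omega

-- dfkCheckA in terms of the segment classes
lemma dfkCheckA_eq (y m d : String) :
    dfkCheckA y m d = (dfkIs4 y && dfkIs2 m && dfkIs2 d) := by
  simp only [dfkCheckA, dfkIs4, dfkIs2]
  cases PySem.Str.len y == 4 <;> cases PySem.Str.strIsdigit y <;>
    cases PySem.Str.len m == 2 <;> cases PySem.Str.strIsdigit m <;>
    cases PySem.Str.len d == 2 <;> cases PySem.Str.strIsdigit d <;> rfl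

-- the window slides past a head that cannot be a year
lemma dfkGo_cons_not4 {p : String} (h : dfkIs4 p = false) (r : List String) :
    dfkGo (p :: r) = dfkGo r := by
  match r with
  | [] => rfl
  | [_] => rfl
  | a :: b :: r' =>
    rw [dfkGo]
    have hc : dfkCheckA p a b = false := by rw [dfkCheckA_eq, h]; rfl
    simp [hc]

-- the window slides past a head whose successor cannot be a month
lemma dfkGo_cons2_not2 {p : String} (y : String) (h : dfkIs2 p = false) (r : List String) :
    dfkGo (y :: p :: r) = dfkGo (p :: r) := by
  match r with
  | [] => rfl
  | a :: r' =>
    rw [dfkGo]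
    have hc : dfkCheckA y p a = false := by rw [dfkCheckA_eq, h]; simp
    simp [hc]

-- the window slides when the third segment cannot be a day
lemma dfkGo_cons3_not2 {p : String} (y m : String) (h : dfkIs2 p = false) (r : List String) :
    dfkGo (y :: m :: p :: r) = dfkGo (m :: p :: r) := by
  rw [dfkGo]
  have hc : dfkCheckA y m p = false := by rw [dfkCheckA_eq, h]; simp
  simp [hc]

-- the state machine computes the sliding-window result (disjointness ⇒ no backtracking)
lemma dfkLoopB_eq_go (r : List String) :
    (∀ m?, dfkLoopB none m? r = dfkGo r) ∧
    (∀ y, dfkIs4 y = true → dfkLoopB (some y) none r = dfkGo (y :: r)) ∧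
    (∀ y m, dfkIs4 y = true → dfkIs2 m = true →
      dfkLoopB (some y) (some m) r = dfkGo (y :: m :: r)) := by
  induction r with
  | nil =>
    refine ⟨fun _ => rfl, fun y _ => ?_, fun y m _ _ => ?_⟩
    · exact (dfkGo_short _ (by simp)).symm
    · exact (dfkGo_short _ (by simp)).symm
  | cons p r ih =>
    obtain ⟨ih0, ih1, ih2⟩ := ih
    refine ⟨fun m? => ?_, fun y hy => ?_, fun y m hy hm => ?_⟩
    · rw [dfkLoopB]
      by_cases h4 : dfkIs4 p = true
      · rw [if_pos h4, ih1 p h4]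
      · rw [if_neg h4, dfkGo_cons_not4 (by simpa using h4)]
        simp only [Option.isSome_none, Bool.and_false]
        rw [if_neg (by simp)]
        exact ih0 none
    · rw [dfkLoopB]
      by_cases h4 : dfkIs4 p = true
      · rw [if_pos h4, ih1 p h4, dfkGo_cons2_not2 y (dfkIs4_not_is2 h4) r]
      · have h4' : dfkIs4 p = false := by simpa using h4
        rw [if_neg h4]
        by_cases h2 : dfkIs2 p = true
        · simp only [h2, Option.isSome_some, Bool.and_self]
          rw [if_pos trivial]
          exact ih2 y p hy h2
        · have h2' : dfkIs2 p = false := by simpa using h2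
          simp only [h2', Bool.false_and]
          rw [if_neg (by simp)]
          rw [ih0 none, dfkGo_cons2_not2 y h2', dfkGo_cons_not4 h4']
    · rw [dfkLoopB]
      by_cases h4 : dfkIs4 p = true
      · rw [if_pos h4, ih1 p h4, dfkGo_cons3_not2 y m (dfkIs4_not_is2 h4),
          dfkGo_cons_not4 (dfkIs2_not_is4 hm)]
      · have h4' : dfkIs4 p = false := by simpa using h4
        rw [if_neg h4]
        by_cases h2 : dfkIs2 p = true
        · simp only [h2, Option.isSome_some, Bool.and_self]
          rw [if_pos trivial, dfkGo]
          have hc : dfkCheckA y m p = true := by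
            rw [dfkCheckA_eq, hy, hm, h2]; rfl
          simp [hc]
        · have h2' : dfkIs2 p = false := by simpa using h2
          simp only [h2', Bool.false_and]
          rw [if_neg (by simp)]
          rw [ih0 none, dfkGo_cons3_not2 y m h2', dfkGo_cons_not4 (dfkIs2_not_is4 hm),
            dfkGo_cons_not4 h4']

-- ===== VERDICT (by name: the statement is the Claim_ definition above) =====
theorem date_from_s3_key_spec : Claim_equal_date_from_s3_key := by
  intro key _
  unfold Spec_date_from_s3_key date_from_s3_key date_from_s3_key_alt
  rw [dfkLoopA_eq_go, (dfkLoopB_eq_go _).1 none]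
  simp
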